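-- pv_equiv track=rewrite | github.com/chenbaichuan18/novel-to-video | src/f06_video_prompt.py | _fix_truncated_json
-- ===== SOURCE A (Python) =====
-- def _fix_truncated_json(json_str: str) -> str:
--     """尝试修复被截断的 JSON 字符串。
--
--     常见场景：LLM 输出因 max_tokens 不足或网络中断导致字符串未闭合。
--     策略：补全未闭合的引号、补全缺失的 } / ]、移除最后一个不完整的值。
--     """
--     fixed = json_str.strip()
--
--     # 检查是否确实看起来像截断的（末尾没有正常闭合）
--     if fixed.endswith("}") or fixed.endswith("]"):
--         return json_str  # 已经是完整结构，无需修复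
--
--     # 策略：逐层修复
--     # 1. 首先处理未闭合的字符串
--     in_string = False
--     quote_char = None
--     last_complete_pos = -1
--     i = 0
--     while i < len(fixed):
--         ch = fixed[i]
--         if not in_string and ch in ('"', "'"):
--             in_string = True
--             quote_char = ch
--         elif in_string and ch == quote_char:
--             # 检查是否是转义引号
--             backslash_count = 0
--             j = i - 1
--             while j >= 0 and fixed[j] == '\\':
--                 backslash_count += 1
--                 j -= 1
--             if backslash_count % 2 == 0:
--                 in_string = False
--                 quote_char = None
--                 last_complete_pos = i
--         elif not in_string and ch in (",", "}", "]"):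
--             last_complete_pos = i
--         i += 1
--
--     if in_string:
--         # 字符串未闭合，截断到最后一个完整位置
--         if last_complete_pos >= 0:
--             fixed = fixed[:last_complete_pos + 1]
--             # 移除尾部逗号
--             fixed = fixed.rstrip(",")
--         else:
--             # 没有找到完整位置，返回空字典
--             return "{}"
--
--     # 2. 补全闭合的括号
--     open_braces = fixed.count("{") - fixed.count("}")
--     open_brackets = fixed.count("[") - fixed.count("]")
--
--     fixed = fixed.rstrip(",")
--     fixed += "]" * open_brackets + "}" * open_braces
--
--     return fixed
-- ===== SOURCE B (Python) =====
-- def _fix_truncated_json(json_str: str) -> str: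
--     fixed = json_str.strip()
--
--     if fixed.endswith("}") or fixed.endswith("]"):
--         return json_str
--
--     # One fused streaming pass: instead of A's staged pipeline (scan with a
--     # backward escape re-scan, slice, four .count() passes, .rstrip), maintain
--     # everything at once -- running brace/bracket balances, the comma-stripped
--     # prefix length, an escape-parity flag -- and snapshot (keep_len, balances)
--     # at every position where the prefix is a safe truncation point.
--     curly = 0            # balance of { / } over the scanned prefix
--     square = 0           # balance of [ / ] over the scanned prefix
--     non_comma_end = 0    # length of the scanned prefix after stripping trailing commas
--     in_string = False
--     quote = ''
--     escaped = False
--     snap = None          # (keep_len, curly, square) at the last safe position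
--
--     for i, ch in enumerate(fixed):
--         if ch == '{':
--             curly += 1
--         elif ch == '}':
--             curly -= 1
--         elif ch == '[':
--             square += 1
--         elif ch == ']':
--             square -= 1
--
--         if in_string:
--             if ch == '\\':
--                 escaped = not escaped
--             else:
--                 if ch == quote and not escaped:
--                     in_string = False
--                     snap = (i + 1, curly, square)
--                 escaped = False
--         elif ch in '"\'':
--             in_string = True
--             quote = ch
--             escaped = False
--         elif ch in ',}]':
--             snap = (non_comma_end if ch == ',' else i + 1, curly, square)
--
--         if ch != ',':
--             non_comma_end = i + 1
--
--     if in_string: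
--         if snap is None:
--             return "{}"
--         keep, curly, square = snap
--         prefix = fixed[:keep]
--     else:
--         prefix = fixed[:non_comma_end]
--
--     return prefix + "]" * square + "}" * curly
-- ===== Notes on version B (the rewrite author's own statement) =====
-- stated objective: alternative
-- what changed: A's staged pipeline (forward scan with a per-quote backward backslash re-scan, then slice, then four .count() passes and .rstrip calls) is replaced by one fused streaming pass that maintains running brace/bracket balances, the comma-stripped prefix length and an escape-parity flag, and snapshots (keep_length, balances) at every safe truncation point, so the output is assembled directly from the final state with a single slice.
import Mathlib
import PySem

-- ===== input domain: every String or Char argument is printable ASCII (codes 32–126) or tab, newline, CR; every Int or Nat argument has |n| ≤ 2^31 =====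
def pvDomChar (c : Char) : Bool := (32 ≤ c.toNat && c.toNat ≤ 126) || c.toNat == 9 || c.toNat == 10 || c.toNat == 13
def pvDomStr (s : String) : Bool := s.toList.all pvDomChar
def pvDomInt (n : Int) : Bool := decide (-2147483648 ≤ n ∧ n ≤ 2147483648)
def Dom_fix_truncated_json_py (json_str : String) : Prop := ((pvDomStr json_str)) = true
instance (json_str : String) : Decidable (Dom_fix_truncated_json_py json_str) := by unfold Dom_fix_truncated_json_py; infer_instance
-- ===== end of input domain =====

-- B replaces A's staged pipeline (scan with backward backslash re-scans, slice, four .count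
-- passes, .rstrip) by ONE fused streaming pass maintaining running balances, the
-- comma-stripped prefix length and an escape-parity flag, snapshotting at safe positions
-- (objective: alternative single-pass algorithm; same return value everywhere).

-- ===== PORT A =====

-- 's.rstrip(",")' on the char-list side (PySem has no rstrip-with-chars primitive); used by both ports.
def pvRstripComma (cs : List Char) : List Char :=
  (cs.reverse.dropWhile (· == ',')).reverse

-- inner 'while j >= 0 and fixed[j] == "\\"' backward scan of A
def pvCountBS (cs : List Char) (j : Int) : Nat :=
  if h : 0 ≤ j ∧ cs[j.toNat]? = some '\\' then pvCountBS cs (j - 1) + 1 else 0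
termination_by (j + 1).toNat
decreasing_by omega

-- A's 'while i < len(fixed)' scan; state: (in_string, quote_char, last_complete_pos)
def pvLoopA (cs : List Char) (i : Nat) (inS : Bool) (qc : Option Char) (lcp : Int) : Bool × Int :=
  if h : i < cs.length then
    let ch := cs[i]
    if !inS && (ch == '"' || ch == '\'') then
      pvLoopA cs (i + 1) true (some ch) lcp
    else if inS && (some ch == qc) then
      if pvCountBS cs ((i : Int) - 1) % 2 == 0 then
        pvLoopA cs (i + 1) false none (i : Int)
      else
        pvLoopA cs (i + 1) inS qc lcp
    else if !inS && (ch == ',' || ch == '}' || ch == ']') then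
      pvLoopA cs (i + 1) inS qc (i : Int)
    else
      pvLoopA cs (i + 1) inS qc lcp
  else (inS, lcp)
termination_by cs.length - i

-- A's tail: count braces, rstrip ",", append closers
def pvCloseA (fixed : List Char) : String :=
  let ob : Int := (PySem.Chars.count fixed ['{'] : Int) - (PySem.Chars.count fixed ['}'] : Int)
  let obk : Int := (PySem.Chars.count fixed ['['] : Int) - (PySem.Chars.count fixed [']'] : Int)
  let f2 := pvRstripComma fixed
  String.mk (f2 ++ List.replicate obk.toNat ']' ++ List.replicate ob.toNat '}')

def fix_truncated_json_py (json_str : String) : String :=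
  let fixed := PySem.Chars.strip json_str.toList
  if PySem.Chars.endswith fixed ['}'] || PySem.Chars.endswith fixed [']'] then json_str
  else
    let st := pvLoopA fixed 0 false none (-1)
    if st.1 then
      if 0 ≤ st.2 then
        pvCloseA (pvRstripComma (PySem.List.slice fixed none (some (st.2 + 1))))
      else "{}"
    else pvCloseA fixed

-- ===== PORT B =====

-- the loop state of B's single fused pass (one field per Python variable)
structure PvB where
  inS : Bool
  quote : Char
  esc : Bool
  curly : Int
  square : Int
  nce : Nat                          -- non_comma_end
  snap : Option (Nat × Int × Int)    -- (keep_len, curly, square) at last safe position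
deriving DecidableEq, Repr

-- one iteration of B's 'for i, ch in enumerate(fixed)' loop
def pvStepB (st : PvB) (p : Int × Char) : PvB :=
  let i := p.1; let ch := p.2
  let st1 :=
    if ch == '{' then { st with curly := st.curly + 1 }
    else if ch == '}' then { st with curly := st.curly - 1 }
    else if ch == '[' then { st with square := st.square + 1 }
    else if ch == ']' then { st with square := st.square - 1 }
    else st
  let st2 :=
    if st1.inS then
      if ch == '\\' then { st1 with esc := !st1.esc }
      else if ch == st1.quote && !st1.esc then
        { st1 with inS := false, esc := false, snap := some (i.toNat + 1, st1.curly, st1.square) }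
      else { st1 with esc := false }
    else if ch == '"' || ch == '\'' then { st1 with inS := true, quote := ch, esc := false }
    else if ch == ',' || ch == '}' || ch == ']' then
      { st1 with snap := some (if ch == ',' then st1.nce else i.toNat + 1, st1.curly, st1.square) }
    else st1
  if ch == ',' then st2 else { st2 with nce := i.toNat + 1 }

def fix_truncated_json_py_alt (json_str : String) : String :=
  let fixed := PySem.Chars.strip json_str.toList
  if PySem.Chars.endswith fixed ['}'] || PySem.Chars.endswith fixed [']'] then json_str
  else
    let st := (PySem.List.enumerate fixed 0).foldl pvStepB ⟨false, ' ', false, 0, 0, 0, none⟩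
    if st.inS then
      match st.snap with
      | none => "{}"
      | some (keep, c, s) =>
        String.mk (fixed.take keep ++ List.replicate s.toNat ']' ++ List.replicate c.toNat '}')
    else
      String.mk (fixed.take st.nce ++ List.replicate st.square.toNat ']'
                 ++ List.replicate st.curly.toNat '}')

-- ===== PRECONDITION & SPEC =====
def Spec_fix_truncated_json_py (json_str : String) (out : String) : Prop := out = fix_truncated_json_py_alt json_str
instance (json_str : String) (out : String) : Decidable (Spec_fix_truncated_json_py json_str out) := by unfold Spec_fix_truncated_json_py; infer_instance

-- ===== CLAIM (what is proved, stated in full; the proofs are below) =====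
def Claim_equal_fix_truncated_json_py : Prop := ∀ (json_str : String), Dom_fix_truncated_json_py json_str → Spec_fix_truncated_json_py json_str (fix_truncated_json_py json_str)

-- ===== LEMMAS AND PROOFS =====

def pvCBal (t : List Char) : Int := (t.count '{' : Int) - t.count '}'
def pvSBal (t : List Char) : Int := (t.count '[' : Int) - t.count ']'

-- the value B's snapshot must hold when A's last_complete_pos is lcp
def pvKeep (cs : List Char) (lcp : Int) : Option (Nat × Int × Int) :=
  if lcp < 0 then none
  else
    let p := pvRstripComma (cs.take (lcp.toNat + 1))
    some (p.length, pvCBal p, pvSBal p)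

-- trailing-backslash count of a prefix
def pvTrailBS (pre : List Char) : Nat := (pre.reverse.takeWhile (· == '\\')).length

lemma pvTrailBS_append (pre : List Char) (c : Char) :
    pvTrailBS (pre ++ [c]) = if c = '\\' then pvTrailBS pre + 1 else 0 := by
  by_cases h : c = '\\' <;> simp [pvTrailBS, h]

lemma pvCountBS_append (pre : List Char) : ∀ rest,
    pvCountBS (pre ++ rest) ((pre.length : Int) - 1) = pvTrailBS pre := by
  induction pre using List.reverseRecOn with
  | nil => intro rest; rw [pvCountBS]; simp [pvTrailBS]
  | append_singleton p a ih =>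
    intro rest
    rw [pvCountBS]
    have hlen : ((p ++ [a]).length : Int) - 1 = (p.length : Int) := by simp
    rw [hlen]
    have hget : ((p ++ [a]) ++ rest)[((p.length : Int)).toNat]? = some a := by
      simp [List.append_assoc]
    by_cases ha : a = '\\'
    · subst ha
      rw [dif_pos ⟨by positivity, hget⟩]
      have h2 := ih (['\\'] ++ rest)
      rw [List.append_assoc, h2, pvTrailBS_append]; simp
    · have : ¬ ((0 : Int) ≤ (p.length : Int) ∧ (((p ++ [a]) ++ rest)[((p.length : Int)).toNat]? = some '\\')) := by
        rw [hget]; simp [ha]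
      rw [dif_neg this, pvTrailBS_append, if_neg ha]

lemma pvRstrip_append (pre : List Char) (c : Char) :
    pvRstripComma (pre ++ [c]) = if c = ',' then pvRstripComma pre else pre ++ [c] := by
  by_cases h : c = ','
  · simp [pvRstripComma, h]
  · simp [pvRstripComma, h]

lemma pvRstrip_prefix (cs : List Char) : pvRstripComma cs <+: cs := by
  refine ⟨(cs.reverse.takeWhile (· == ',')).reverse, ?_⟩
  rw [pvRstripComma, ← List.reverse_append, List.takeWhile_append_dropWhile, List.reverse_reverse]

lemma pvRstripComma_idem (cs : List Char) : pvRstripComma (pvRstripComma cs) = pvRstripComma cs := by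
  simp only [pvRstripComma, List.reverse_reverse]
  congr 1
  induction cs.reverse with
  | nil => simp
  | cons x xs ih =>
    by_cases hx : x = ','
    · simp [hx, ih]
    · simp [hx]

lemma pvRstripComma_count (cs : List Char) (c : Char) (hc : c ≠ ',') :
    (pvRstripComma cs).count c = cs.count c := by
  conv_rhs => rw [← cs.reverse_reverse, ← List.takeWhile_append_dropWhile (p := (· == ',')) (l := cs.reverse)]
  simp only [pvRstripComma, List.count_reverse, List.count_append]
  have : (cs.reverse.takeWhile (· == ',')).count c = 0 := by
    rw [List.count_eq_zero]
    intro hmem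
    have := List.mem_takeWhile_imp hmem
    simp at this
    exact hc (by simp_all)
  omega

lemma pvCBal_rstrip (t : List Char) : pvCBal (pvRstripComma t) = pvCBal t := by
  rw [pvCBal, pvCBal, pvRstripComma_count t '{' (by decide), pvRstripComma_count t '}' (by decide)]

lemma pvSBal_rstrip (t : List Char) : pvSBal (pvRstripComma t) = pvSBal t := by
  rw [pvSBal, pvSBal, pvRstripComma_count t '[' (by decide), pvRstripComma_count t ']' (by decide)]

lemma pvCBal_append (pre : List Char) (c : Char) :
    pvCBal (pre ++ [c]) = pvCBal pre + (if c = '{' then 1 else if c = '}' then -1 else 0) := by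
  by_cases h1 : c = '{' <;> by_cases h2 : c = '}' <;> simp_all [pvCBal, List.count_append] <;> ring

lemma pvSBal_append (pre : List Char) (c : Char) :
    pvSBal (pre ++ [c]) = pvSBal pre + (if c = '[' then 1 else if c = ']' then -1 else 0) := by
  by_cases h1 : c = '[' <;> by_cases h2 : c = ']' <;> simp_all [pvSBal, List.count_append] <;> ring

lemma pvCharsCount_go (c : Char) : ∀ (fuel : Nat) (l : List Char) (acc : Nat), l.length ≤ fuel →
    PySem.Chars.count.go [c] fuel l acc = acc + l.count c := by
  intro fuel
  induction fuel with
  | zero => intro l acc h; cases l <;> simp_all [PySem.Chars.count.go]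
  | succ n ih =>
    intro l acc h
    cases l with
    | nil => simp [PySem.Chars.count.go]
    | cons x xs =>
      rw [PySem.Chars.count.go]
      by_cases hx : x = c
      · subst hx
        rw [if_pos (by simp [List.isPrefixOf])]
        simp only [List.length_cons] at h
        rw [ih _ _ (by simpa using Nat.le_of_succ_le_succ h)]
        simp
        omega
      · rw [if_neg (by simp [List.isPrefixOf]; exact fun h' => hx h'.symm)]
        rw [ih _ _ (by simpa using Nat.le_of_succ_le_succ h)]
        simp [hx]

lemma pvCharsCount_singleton (cs : List Char) (c : Char) :
    PySem.Chars.count cs [c] = cs.count c := by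
  rw [PySem.Chars.count]
  rw [if_neg (by simp)]
  rw [pvCharsCount_go c cs.length cs 0 le_rfl]
  simp

lemma pvClose_eq (t : List Char) :
    pvCloseA t = String.mk (pvRstripComma t ++ List.replicate (pvSBal t).toNat ']'
      ++ List.replicate (pvCBal t).toNat '}') := by
  rw [pvCloseA]
  simp only [pvCharsCount_singleton, pvCBal, pvSBal]

-- the main invariant: B's fused fold tracks A's scan plus the balance/keep bookkeeping
lemma pvLoopEq : ∀ (rest pre : List Char) (inS : Bool) (qc : Char) (esc : Bool) (lcp : Int),
    (inS = true → (esc = decide (pvTrailBS pre % 2 = 1) ∧ (qc = '"' ∨ qc = '\''))) →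
    ∃ qc' esc',
      (PySem.List.enumerate rest (pre.length : Int)).foldl pvStepB
          ⟨inS, qc, esc, pvCBal pre, pvSBal pre, (pvRstripComma pre).length, pvKeep (pre ++ rest) lcp⟩
        = ⟨(pvLoopA (pre ++ rest) pre.length inS (if inS then some qc else none) lcp).1, qc', esc',
           pvCBal (pre ++ rest), pvSBal (pre ++ rest), (pvRstripComma (pre ++ rest)).length,
           pvKeep (pre ++ rest) (pvLoopA (pre ++ rest) pre.length inS (if inS then some qc else none) lcp).2⟩ := by
  intro rest
  induction rest with
  | nil =>
    intro pre inS qc esc lcp hinv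
    refine ⟨qc, esc, ?_⟩
    rw [pvLoopA]
    simp [PySem.List.enumerate]
  | cons ch rest' ih =>
    intro pre inS qc esc lcp hinv
    have hlt : pre.length < (pre ++ ch :: rest').length := by simp
    have hch : (pre ++ ch :: rest')[pre.length] = ch := by simp
    rw [pvLoopA, dif_pos hlt]
    rw [PySem.List.enumerate_cons, List.foldl_cons]
    simp only [hch]
    -- recursion helper: apply ih with prefix pre ++ [ch]
    have step : ∀ (inS' : Bool) (qc' : Char) (esc' : Bool) (lcp' : Int),
        (inS' = true → (esc' = decide (pvTrailBS (pre ++ [ch]) % 2 = 1) ∧ (qc' = '"' ∨ qc' = '\''))) →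
        ∃ a b,
          (PySem.List.enumerate rest' ((pre.length : Int) + 1)).foldl pvStepB
              ⟨inS', qc', esc', pvCBal (pre ++ [ch]), pvSBal (pre ++ [ch]),
               (pvRstripComma (pre ++ [ch])).length, pvKeep (pre ++ ch :: rest') lcp'⟩
            = ⟨(pvLoopA (pre ++ ch :: rest') (pre.length + 1) inS' (if inS' then some qc' else none) lcp').1, a, b,
               pvCBal (pre ++ ch :: rest'), pvSBal (pre ++ ch :: rest'),
               (pvRstripComma (pre ++ ch :: rest')).length,
               pvKeep (pre ++ ch :: rest') (pvLoopA (pre ++ ch :: rest') (pre.length + 1) inS' (if inS' then some qc' else none) lcp').2⟩ := by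
      intro inS' qc' esc' lcp' hinv'
      have h2 := ih (pre ++ [ch]) inS' qc' esc' lcp' hinv'
      simpa [List.append_assoc] using h2
    -- snapshot value when the new lcp is pre.length
    have hTake : (pre ++ ch :: rest').take (pre.length + 1) = pre ++ [ch] := by
      have : pre ++ ch :: rest' = (pre ++ [ch]) ++ rest' := by simp
      rw [this]
      have hl : pre.length + 1 = (pre ++ [ch]).length := by simp
      rw [hl, List.take_left]
    have hKeepNew : pvKeep (pre ++ ch :: rest') ((pre.length : Nat) : Int)
        = some ((pvRstripComma (pre ++ [ch])).length, pvCBal (pvRstripComma (pre ++ [ch])),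
                pvSBal (pvRstripComma (pre ++ [ch]))) := by
      rw [pvKeep, if_neg (by omega)]
      simp [hTake]
    have hNcomma : (pvRstripComma (pre ++ [','])).length = (pvRstripComma pre).length := by
      rw [pvRstrip_append, if_pos rfl]
    have hTN : ((pre.length : Int)).toNat = pre.length := by simp
    cases inS with
    | false =>
      by_cases hq : ch = '"' ∨ ch = '\''
      · have hbs : ch ≠ '\\' := by rcases hq with h | h <;> simp [h]
        have hcm : ch ≠ ',' := by rcases hq with h | h <;> simp [h]
        have hN : (pvRstripComma (pre ++ [ch])).length = pre.length + 1 := by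
          rw [pvRstrip_append, if_neg hcm]; simp
        rw [if_pos (by rcases hq with h | h <;> simp [h])]
        have eB : pvStepB ⟨false, qc, esc, pvCBal pre, pvSBal pre, (pvRstripComma pre).length,
              pvKeep (pre ++ ch :: rest') lcp⟩ ((pre.length : Int), ch)
            = ⟨true, ch, false, pvCBal (pre ++ [ch]), pvSBal (pre ++ [ch]),
               (pvRstripComma (pre ++ [ch])).length, pvKeep (pre ++ ch :: rest') lcp⟩ := by
          rcases hq with h | h <;> subst h <;>
            simp [pvStepB, hN, pvCBal_append, pvSBal_append]
        rw [eB]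
        exact step true ch false lcp (by
          intro _
          exact ⟨by rw [pvTrailBS_append, if_neg hbs]; simp, hq⟩)
      · push_neg at hq
        rw [if_neg (by simp [hq.1, hq.2]), if_neg (by simp)]
        by_cases hc : ch = ',' ∨ ch = '}' ∨ ch = ']'
        · rw [if_pos (by rcases hc with h | h | h <;> simp [h])]
          have eB : pvStepB ⟨false, qc, esc, pvCBal pre, pvSBal pre, (pvRstripComma pre).length,
                pvKeep (pre ++ ch :: rest') lcp⟩ ((pre.length : Int), ch)
              = ⟨false, qc, esc, pvCBal (pre ++ [ch]), pvSBal (pre ++ [ch]),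
                 (pvRstripComma (pre ++ [ch])).length,
                 pvKeep (pre ++ ch :: rest') ((pre.length : Nat) : Int)⟩ := by
            rw [hKeepNew]
            rcases hc with h | h | h <;>
              subst h <;>
              simp [pvStepB, pvCBal_append, pvSBal_append, hTN, pvRstrip_append,
                    pvCBal_rstrip, pvSBal_rstrip, hNcomma, sub_eq_add_neg]
          rw [eB]
          exact step false qc esc ((pre.length : Nat) : Int) (by simp)
        · push_neg at hc
          rw [if_neg (by simp [hc.1, hc.2.1, hc.2.2])]
          have hN : (pvRstripComma (pre ++ [ch])).length = pre.length + 1 := by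
            rw [pvRstrip_append, if_neg hc.1]; simp
          have eB : pvStepB ⟨false, qc, esc, pvCBal pre, pvSBal pre, (pvRstripComma pre).length,
                pvKeep (pre ++ ch :: rest') lcp⟩ ((pre.length : Int), ch)
              = ⟨false, qc, esc, pvCBal (pre ++ [ch]), pvSBal (pre ++ [ch]),
                 (pvRstripComma (pre ++ [ch])).length, pvKeep (pre ++ ch :: rest') lcp⟩ := by
            clear ih step hKeepNew hTake
            by_cases h1 : ch = '{' <;> by_cases h2 : ch = '}' <;>
              by_cases h3 : ch = '[' <;> by_cases h4 : ch = ']' <;>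
              simp_all [pvStepB, pvCBal_append, pvSBal_append, sub_eq_add_neg]
          rw [eB]
          exact step false qc esc lcp (by simp)
    | true =>
      obtain ⟨hesc, hqc⟩ := hinv rfl
      have hqbs : qc ≠ '\\' := by rcases hqc with h | h <;> simp [h]
      have hqcm : qc ≠ ',' := by rcases hqc with h | h <;> simp [h]
      have hq1 : qc ≠ '{' := by rcases hqc with h | h <;> simp [h]
      have hq2 : qc ≠ '}' := by rcases hqc with h | h <;> simp [h]
      have hq3 : qc ≠ '[' := by rcases hqc with h | h <;> simp [h]
      have hq4 : qc ≠ ']' := by rcases hqc with h | h <;> simp [h]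
      rw [if_neg (by simp)]
      by_cases heq : ch = qc
      · subst heq
        have hN : (pvRstripComma (pre ++ [ch])).length = pre.length + 1 := by
          rw [pvRstrip_append, if_neg hqcm]; simp
        rw [if_pos (by simp)]
        rw [pvCountBS_append pre (ch :: rest')]
        by_cases hz : pvTrailBS pre % 2 = 0
        · rw [if_pos (by simp [hz])]
          have hescf : esc = false := by rw [hesc]; simp; omega
          have eB : pvStepB ⟨true, ch, esc, pvCBal pre, pvSBal pre, (pvRstripComma pre).length,
                pvKeep (pre ++ ch :: rest') lcp⟩ ((pre.length : Int), ch)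
              = ⟨false, ch, false, pvCBal (pre ++ [ch]), pvSBal (pre ++ [ch]),
                 (pvRstripComma (pre ++ [ch])).length,
                 pvKeep (pre ++ ch :: rest') ((pre.length : Nat) : Int)⟩ := by
            rw [hKeepNew]
            rw [pvRstrip_append, if_neg hqcm]
            simp [pvStepB, hescf, hqbs, hqcm, hq1, hq2, hq3, hq4, hN, hTN,
                  pvCBal_append, pvSBal_append, pvRstrip_append]
          rw [eB]
          exact step false ch false ((pre.length : Nat) : Int) (by simp)
        · rw [if_neg (by simp [hz])]
          have hesct : esc = true := by rw [hesc]; simp; omega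
          have eB : pvStepB ⟨true, ch, esc, pvCBal pre, pvSBal pre, (pvRstripComma pre).length,
                pvKeep (pre ++ ch :: rest') lcp⟩ ((pre.length : Int), ch)
              = ⟨true, ch, false, pvCBal (pre ++ [ch]), pvSBal (pre ++ [ch]),
                 (pvRstripComma (pre ++ [ch])).length, pvKeep (pre ++ ch :: rest') lcp⟩ := by
            simp [pvStepB, hesct, hqbs, hqcm, hq1, hq2, hq3, hq4, hN, hTN,
                  pvCBal_append, pvSBal_append]
          rw [eB]
          exact step true ch false lcp (by
            intro _
            exact ⟨by rw [pvTrailBS_append, if_neg hqbs]; simp, hqc⟩)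
      · rw [if_neg (by simp [heq]), if_neg (by simp)]
        by_cases hbs : ch = '\\'
        · subst hbs
          have hN : (pvRstripComma (pre ++ ['\\'])).length = pre.length + 1 := by
            rw [pvRstrip_append, if_neg (by decide)]; simp
          have eB : pvStepB ⟨true, qc, esc, pvCBal pre, pvSBal pre, (pvRstripComma pre).length,
                pvKeep (pre ++ '\\' :: rest') lcp⟩ ((pre.length : Int), '\\')
              = ⟨true, qc, !esc, pvCBal (pre ++ ['\\']), pvSBal (pre ++ ['\\']),
                 (pvRstripComma (pre ++ ['\\'])).length, pvKeep (pre ++ '\\' :: rest') lcp⟩ := by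
            simp [pvStepB, hN, hTN, pvCBal_append, pvSBal_append]
          rw [eB]
          exact step true qc (!esc) lcp (by
            intro _
            refine ⟨?_, hqc⟩
            rw [pvTrailBS_append, if_pos rfl, hesc]
            rcases Nat.mod_two_eq_zero_or_one (pvTrailBS pre) with h | h <;>
              simp [h, Nat.add_mod])
        · have eB : pvStepB ⟨true, qc, esc, pvCBal pre, pvSBal pre, (pvRstripComma pre).length,
                pvKeep (pre ++ ch :: rest') lcp⟩ ((pre.length : Int), ch)
              = ⟨true, qc, false, pvCBal (pre ++ [ch]), pvSBal (pre ++ [ch]),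
                 (pvRstripComma (pre ++ [ch])).length, pvKeep (pre ++ ch :: rest') lcp⟩ := by
            by_cases hcm : ch = ','
            · subst hcm
              simp [pvStepB, heq, Ne.symm hqcm, hNcomma,
                    pvCBal_append, pvSBal_append, sub_eq_add_neg]
            · have hN : (pvRstripComma (pre ++ [ch])).length = pre.length + 1 := by
                rw [pvRstrip_append, if_neg hcm]; simp
              clear ih step hKeepNew hTake
              by_cases h1 : ch = '{' <;> by_cases h2 : ch = '}' <;>
                by_cases h3 : ch = '[' <;> by_cases h4 : ch = ']' <;>
                simp_all [pvStepB, pvCBal_append, pvSBal_append, sub_eq_add_neg]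
          rw [eB]
          exact step true qc false lcp (by
            intro _
            exact ⟨by rw [pvTrailBS_append, if_neg hbs]; simp, hqc⟩)

lemma pvTake_of_prefix {p cs : List Char} (h : p <+: cs) : cs.take p.length = p :=
  (List.prefix_iff_eq_take.mp h).symm

-- ===== VERDICT (by name: the statement is the Claim_ definition above) =====
theorem fix_truncated_json_py_spec : Claim_equal_fix_truncated_json_py := by
  intro json_str _
  unfold Spec_fix_truncated_json_py fix_truncated_json_py fix_truncated_json_py_alt
  set cs := PySem.Chars.strip json_str.toList with hcs
  by_cases he : (PySem.Chars.endswith cs ['}'] || PySem.Chars.endswith cs [']']) = true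
  · simp [he]
  · simp only [he, if_false, Bool.false_eq_true]
    obtain ⟨qc', esc', hfold⟩ := pvLoopEq cs [] false ' ' false (-1) (by simp)
    simp only [List.nil_append, List.length_nil, Nat.cast_zero, Bool.false_eq_true, if_false] at hfold
    have hinit : (⟨false, ' ', false, pvCBal [], pvSBal [], (pvRstripComma []).length,
        pvKeep cs (-1)⟩ : PvB) = ⟨false, ' ', false, 0, 0, 0, none⟩ := by
      simp [pvCBal, pvSBal, pvRstripComma, pvKeep]
    rw [hinit] at hfold
    rw [hfold]
    set A := pvLoopA cs 0 false none (-1) with hA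
    cases h1 : A.1 with
    | false =>
      simp only [h1, Bool.false_eq_true, if_false]
      rw [pvClose_eq, pvTake_of_prefix (pvRstrip_prefix cs)]
    | true =>
      simp only [h1, eq_self_iff_true, if_true]
      by_cases h2 : 0 ≤ A.2
      · rw [if_pos h2]
        have hk : pvKeep cs A.2 = some ((pvRstripComma (cs.take (A.2.toNat + 1))).length,
            pvCBal (pvRstripComma (cs.take (A.2.toNat + 1))),
            pvSBal (pvRstripComma (cs.take (A.2.toNat + 1)))) := by
          rw [pvKeep, if_neg (by omega)]
        rw [hk]
        set p := pvRstripComma (cs.take (A.2.toNat + 1)) with hp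
        have hslice : PySem.List.slice cs none (some (A.2 + 1)) = cs.take (A.2.toNat + 1) := by
          rw [PySem.List.slice_to cs (show (0:Int) ≤ A.2 + 1 by omega)]
          congr 1
          omega
        have htp : cs.take p.length = p := by
          apply pvTake_of_prefix
          have hpp : p <+: cs.take (A.2.toNat + 1) := by
            rw [hp]; exact pvRstrip_prefix _
          exact hpp.trans (List.take_prefix (A.2.toNat + 1) cs)
        have hpi : pvRstripComma p = p := by rw [hp, pvRstripComma_idem]
        rw [hslice, ← hp, pvClose_eq, hpi]
        simp [htp]
      · rw [if_neg h2]
        have hk : pvKeep cs A.2 = none := by rw [pvKeep, if_pos (by omega)]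
        rw [hk]
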